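-- pv_equiv track=rewrite | github.com/dioscuri-tda/ecp_experiments | bifiltered_cubical/src/two_cubical_utils.py | prune_contributions
-- ===== SOURCE A (Python) =====
-- def prune_contributions(contributions):
--
--     total_ECP = dict()
--
--     for a in contributions:
--         total_ECP[a[0]] = total_ECP.get(a[0], 0) + a[1]
--
--     # remove the contributions that are 0
--     to_del = []
--     for key in total_ECP:
--         if total_ECP[key] == 0:
--             to_del.append(key)
--     for key in to_del:
--         del total_ECP[key]
--
--     return sorted(list(total_ECP.items()), key=lambda x: x[0])
-- ===== SOURCE B (Python) =====
-- def prune_contributions(contributions):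
--     s = sorted(contributions, key=lambda a: a[0])
--     out = []
--     i = 0
--     n = len(s)
--     while i < n:
--         k = s[i][0]
--         tot = 0
--         while i < n and s[i][0] == k:
--             tot += s[i][1]
--             i += 1
--         if tot != 0:
--             out.append((k, tot))
--     return out
-- ===== Notes on version B (the rewrite author's own statement) =====
-- stated objective: alternative
-- what changed: Replaces A's dict-accumulate / collect-zero-keys / delete / final-sort pipeline by sorting the contributions by key first and then doing one linear scan that sums each run of equal keys, emitting (key, total) when the total is nonzero; no dict and no post-sort.
import Mathlib
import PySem

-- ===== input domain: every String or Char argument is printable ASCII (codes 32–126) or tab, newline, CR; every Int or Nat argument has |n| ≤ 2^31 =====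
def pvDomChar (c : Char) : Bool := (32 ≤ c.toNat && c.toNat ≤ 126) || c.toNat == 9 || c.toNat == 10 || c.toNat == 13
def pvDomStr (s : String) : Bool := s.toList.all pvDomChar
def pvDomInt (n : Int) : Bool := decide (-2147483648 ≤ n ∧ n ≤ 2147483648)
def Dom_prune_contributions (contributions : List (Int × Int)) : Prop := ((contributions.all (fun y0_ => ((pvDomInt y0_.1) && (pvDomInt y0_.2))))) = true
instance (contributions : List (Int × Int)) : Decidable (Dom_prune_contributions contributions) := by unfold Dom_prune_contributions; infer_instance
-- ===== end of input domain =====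

-- B replaces A's dict-accumulate / zero-delete / final-sort pipeline by sort-first then one
-- linear grouping scan over runs of equal keys (objective: alternative decomposition, no dict).


-- ===== PORT A =====
-- literal port of A: build the totals dict, collect keys whose total is 0, delete them,
-- return items sorted by key.  total_ECP[key] inside the second loop is read as getD key 0,
-- exact because key ranges over the dict's own keys (no KeyError possible).
def prune_contributions (contributions : List (Int × Int)) : List (Int × Int) :=
  let total_ECP := contributions.foldl
    (fun d a => d.insert a.1 (d.getD a.1 0 + a.2)) (PySem.Dict.empty (κ := Int) (ν := Int))
  let to_del := total_ECP.keys.foldl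
    (fun acc key => if total_ECP.getD key 0 == 0 then acc ++ [key] else acc) []
  let total_ECP2 := to_del.foldl (fun d key => d.erase key) total_ECP
  PySem.List.sorted total_ECP2.items (fun x => x.1) false

-- ===== PORT B =====
-- port of Source B's inner while loop: one run of equal keys = takeWhile, then continue after it
def pvGroupRuns : List (Int × Int) → List (Int × Int)
  | [] => []
  | (k, v) :: rest =>
    let tot := v + ((rest.takeWhile (fun p => p.1 == k)).map Prod.snd).sum
    let rest' := rest.dropWhile (fun p => p.1 == k)
    if tot ≠ 0 then (k, tot) :: pvGroupRuns rest' else pvGroupRuns rest'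
termination_by l => l.length
decreasing_by
  all_goals
    have := List.length_dropWhile_le (fun p : Int × Int => p.1 == k) rest
    simp only [List.length_cons]
    omega

def prune_contributions_alt (contributions : List (Int × Int)) : List (Int × Int) :=
  pvGroupRuns (PySem.List.sorted contributions (fun a => a.1) false)

-- ===== PRECONDITION & SPEC =====
def Spec_prune_contributions (contributions : List (Int × Int)) (out : List (Int × Int)) : Prop := out = prune_contributions_alt contributions
instance (contributions : List (Int × Int)) (out : List (Int × Int)) : Decidable (Spec_prune_contributions contributions out) := by unfold Spec_prune_contributions; infer_instance

-- ===== CLAIM (what is proved, stated in full; the proofs are below) =====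
def Claim_equal_prune_contributions : Prop := ∀ (contributions : List (Int × Int)), Dom_prune_contributions contributions → Spec_prune_contributions contributions (prune_contributions contributions)

-- ===== LEMMAS AND PROOFS =====

-- total contribution of key k in l
def pvSum (l : List (Int × Int)) (k : Int) : Int :=
  ((l.filter (fun p => p.1 == k)).map Prod.snd).sum

-- canonical pruned association list, keys in first-occurrence order of ks
def pvCanon (ks : List Int) (S : Int → Int) : List (Int × Int) :=
  ((PySem.Set.ofList ks).map (fun k => (k, S k))).filter (fun p => decide (p.2 ≠ 0))

-- ---- A-side characterisation ----

theorem pv_getD_fold (l : List (Int × Int)) (d : PySem.Dict Int Int) (k : Int) :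
    (l.foldl (fun d a => d.insert a.1 (d.getD a.1 0 + a.2)) d).getD k 0
      = d.getD k 0 + pvSum l k := by
  induction l generalizing d with
  | nil => simp [pvSum]
  | cons a t ih =>
      simp only [List.foldl_cons, ih, pvSum, List.filter_cons]
      by_cases h : a.1 = k
      · simp [h]; ring
      · have : (a.1 == k) = false := by simp [h]
        simp [this, PySem.Dict.getD_insert, Ne.symm h]

theorem pv_erase_fold_items (ks : List Int) (d : PySem.Dict Int Int) :
    (ks.foldl (fun d key => d.erase key) d).items
      = d.items.filter (fun p => !ks.contains p.1) := by
  induction ks generalizing d with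
  | nil => simp
  | cons k t ih =>
      simp only [List.foldl_cons, ih]
      show _ = List.filter _ d.items
      have : (PySem.Dict.erase d k).items = d.items.filter (fun p => !(p.1 == k)) := rfl
      rw [this, List.filter_filter]
      apply List.filter_congr
      intro p _
      by_cases h : p.1 = k <;> simp [h]

theorem pv_A_eq_sorted_canon (l : List (Int × Int)) :
    prune_contributions l
      = PySem.List.sorted (pvCanon (l.map Prod.fst) (pvSum l)) (fun x => x.1) false := by
  set d := l.foldl (fun d a => d.insert a.1 (d.getD a.1 0 + a.2))
              (PySem.Dict.empty (κ := Int) (ν := Int)) with hd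
  show PySem.List.sorted
      ((List.foldl (fun d key => d.erase key) d
        (List.foldl (fun acc key => if d.getD key 0 == 0 then acc ++ [key] else acc) [] d.keys)).items)
      (fun x => x.1) false = _
  have hkeys : d.keys = PySem.Set.ofList (l.map Prod.fst) := by
    rw [hd, PySem.Dict.keys_foldl_insert_key l (fun a => a.1) (fun d a => d.getD a.1 0 + a.2)]
    simp [PySem.Set.update, PySem.Set.ofList, PySem.Dict.keys_empty, PySem.Set.empty]
  have hnd : d.keys.Nodup := by rw [hkeys]; exact PySem.Set.nodup_ofList _
  have hgetD : ∀ k, d.getD k 0 = pvSum l k := by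
    intro k; rw [hd, pv_getD_fold]; simp [PySem.Dict.getD_empty]
  have hitems : d.items = (PySem.Set.ofList (l.map Prod.fst)).map (fun k => (k, pvSum l k)) := by
    rw [PySem.Dict.items_eq_map_keys d hnd 0, hkeys]
    exact List.map_congr_left (fun k _ => by rw [hgetD])
  have htodel : d.keys.foldl
      (fun acc key => if d.getD key 0 == 0 then acc ++ [key] else acc) []
      = d.keys.filter (fun key => d.getD key 0 == 0) := by
    simpa using PySem.List.foldl_append_if_eq_filter
      (fun key => d.getD key 0 == 0) d.keys []
  rw [htodel, pv_erase_fold_items]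
  congr 1
  have hmem_todel : ∀ p ∈ d.items,
      ((d.keys.filter (fun key => d.getD key 0 == 0)).contains p.1) = (p.2 == 0) := by
    intro p hp
    have hpd : d.getD p.1 0 = p.2 := PySem.Dict.getD_of_mem_items d (by simpa using hp) hnd 0
    have hk : p.1 ∈ d.keys := PySem.Dict.mem_keys_of_mem_items d hp
    by_cases h0 : p.2 = 0
    · simp [List.mem_filter, hk, hpd, h0]
    · simp [List.mem_filter, hpd, h0]
  rw [List.filter_congr (fun p hp => by rw [hmem_todel p hp])]
  rw [hitems, pvCanon]
  apply List.filter_congr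
  intro p _
  by_cases h : p.2 = 0 <;> simp [h]

-- ---- B-side characterisation ----

theorem pv_foldl_add_all_eq (g : List Int) (k : Int) (h : ∀ x ∈ g, x = k) :
    List.foldl PySem.Set.add [k] g = [k] := by
  induction g with
  | nil => rfl
  | cons x t ih =>
      have hx : x = k := h x (by simp)
      have : PySem.Set.add [k] x = [k] := by
        simp [PySem.Set.add, PySem.Set.contains, hx]
      rw [List.foldl_cons, this]
      exact ih (fun y hy => h y (by simp [hy]))

theorem pv_foldl_add_cons_notmem (r : List Int) (k : Int) (acc : List Int) (hk : k ∉ r) :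
    List.foldl PySem.Set.add (k :: acc) r = k :: List.foldl PySem.Set.add acc r := by
  induction r generalizing acc with
  | nil => rfl
  | cons x t ih =>
      have hxk : x ≠ k := fun h => hk (by simp [h])
      have hstep : PySem.Set.add (k :: acc) x = k :: PySem.Set.add acc x := by
        have hxkb : (x == k) = false := by simpa using hxk
        simp only [PySem.Set.add, PySem.Set.contains, List.contains_cons, hxkb, Bool.false_or]
        split <;> rfl
      rw [List.foldl_cons, hstep, List.foldl_cons]
      exact ih (PySem.Set.add acc x) (fun h => hk (List.mem_cons_of_mem x h))

theorem pv_ofList_split (g r : List Int) (k : Int)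
    (hg : ∀ x ∈ g, x = k) (hr : k ∉ r) :
    PySem.Set.ofList (k :: g ++ r) = k :: PySem.Set.ofList r := by
  show List.foldl PySem.Set.add (PySem.Set.add PySem.Set.empty k) (g ++ r) = _
  have h1 : PySem.Set.add PySem.Set.empty k = [k] := rfl
  rw [h1, List.foldl_append, pv_foldl_add_all_eq g k hg]
  exact pv_foldl_add_cons_notmem r k [] hr

theorem pv_foldl_add_sublist (xs : List Int) (acc : List Int) :
    (List.foldl PySem.Set.add acc xs).Sublist (acc ++ xs) := by
  induction xs generalizing acc with
  | nil => simp
  | cons x t ih =>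
      rw [List.foldl_cons]
      refine (ih (PySem.Set.add acc x)).trans ?_
      by_cases h : PySem.Set.contains acc x = true
      · have hax : PySem.Set.add acc x = acc := by unfold PySem.Set.add; rw [if_pos h]
        rw [hax]
        exact List.Sublist.append_left (List.sublist_cons_self x t) acc
      · have hax : PySem.Set.add acc x = acc ++ [x] := by unfold PySem.Set.add; rw [if_neg h]
        rw [hax, List.append_assoc]
        simp
theorem pv_ofList_sublist (xs : List Int) : (PySem.Set.ofList xs).Sublist xs := by
  simpa using pv_foldl_add_sublist xs []

-- main grouping lemma: on a list sorted (≤) by key, the run scan produces the canonical list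
theorem pv_groupRuns_spec (n : Nat) : ∀ s : List (Int × Int), s.length ≤ n →
    s.Pairwise (fun a b => a.1 ≤ b.1) →
    pvGroupRuns s = pvCanon (s.map Prod.fst) (pvSum s) := by
  induction n with
  | zero =>
      intro s hlen _
      have : s = [] := List.eq_nil_of_length_eq_zero (Nat.le_zero.mp hlen)
      subst this
      simp [pvGroupRuns, pvCanon, PySem.Set.ofList, PySem.Set.empty]
  | succ n ih =>
      intro s hlen hsorted
      match s with
      | [] => simp [pvGroupRuns, pvCanon, PySem.Set.ofList, PySem.Set.empty]
      | (k, v) :: rest =>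
        set g := rest.takeWhile (fun p : Int × Int => p.1 == k) with hg
        set r := rest.dropWhile (fun p : Int × Int => p.1 == k) with hr
        have hsplit : rest = g ++ r := (List.takeWhile_append_dropWhile).symm
        have hgk : ∀ p ∈ g, p.1 = k := by
          intro p hp
          have := List.mem_takeWhile_imp hp
          simpa using this
        have hrest_le : ∀ p ∈ rest, k ≤ p.1 := by
          have h := List.pairwise_cons.mp hsorted
          exact fun p hp => h.1 p hp
        have hr_pw : r.Pairwise (fun a b => a.1 ≤ b.1) :=
          List.Pairwise.sublist (List.dropWhile_sublist _) ((List.pairwise_cons.mp hsorted).2)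
        have hr_gt : ∀ p ∈ r, k < p.1 := by
          intro p hp
          match hre : r with
          | [] => simp [hre] at hp
          | q :: t =>
            have hqk : (q.1 == k) = false := by
              have := List.head_dropWhile_not (fun p : Int × Int => p.1 == k)
                (l := rest) (by rw [← hr, hre]; simp)
              simpa [← hr, hre] using this
            have hqk' : q.1 ≠ k := by simpa using hqk
            have hqle : k ≤ q.1 := hrest_le q (by rw [hsplit, hre]; simp)
            have hkq : k < q.1 := lt_of_le_of_ne hqle (Ne.symm hqk')
            rw [hre] at hp
            rcases List.mem_cons.mp hp with h | h
            · rw [h]; exact hkq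
            · have : q.1 ≤ p.1 := (List.pairwise_cons.mp (hre ▸ hr_pw)).1 p h
              omega
        have hkr : k ∉ r.map Prod.fst := by
          intro hk
          rcases List.mem_map.mp hk with ⟨p, hp, hpk⟩
          exact absurd (hpk ▸ hr_gt p hp) (lt_irrefl k)
        -- key list splits
        have hmapfst : ((k, v) :: rest).map Prod.fst = k :: (g.map Prod.fst ++ r.map Prod.fst) := by
          rw [hsplit]; simp
        have hofl : PySem.Set.ofList (((k, v) :: rest).map Prod.fst)
            = k :: PySem.Set.ofList (r.map Prod.fst) := by
          rw [hmapfst]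
          exact pv_ofList_split _ _ k
            (fun x hx => by rcases List.mem_map.mp hx with ⟨p, hp, hpk⟩; rw [← hpk]; exact hgk p hp)
            hkr
        -- sums
        have hsum_k : pvSum ((k, v) :: rest) k = v + (g.map Prod.snd).sum := by
          rw [pvSum, hsplit, List.filter_cons]
          have hgf : g.filter (fun p => p.1 == k) = g :=
            List.filter_eq_self.mpr (fun p hp => by simp [hgk p hp])
          have hrf : r.filter (fun p => p.1 == k) = [] :=
            List.filter_eq_nil_iff.mpr (fun p hp => by
              have := hr_gt p hp; simp; omega)
          simp [List.filter_append, hgf, hrf]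
        have hsum_r : ∀ k', k' ∈ PySem.Set.ofList (r.map Prod.fst) →
            pvSum ((k, v) :: rest) k' = pvSum r k' := by
          intro k' hk'
          have hk'r : k' ∈ r.map Prod.fst := (PySem.Set.mem_ofList _ _).mp hk'
          rcases List.mem_map.mp hk'r with ⟨p, hp, hpk⟩
          have hkk' : k < k' := hpk ▸ hr_gt p hp
          rw [pvSum, hsplit, List.filter_cons]
          have h1 : (k == k') = false := by simp; omega
          have hgf : g.filter (fun p => p.1 == k') = [] :=
            List.filter_eq_nil_iff.mpr (fun p hp => by
              have := hgk p hp; simp [this]; omega)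
          simp [h1, List.filter_append, hgf, pvSum]
        -- unfold one step of pvGroupRuns
        have hlen' : r.length ≤ n := by
          have h1 : r.length ≤ rest.length := hr ▸ List.length_dropWhile_le _ rest
          have h2 : rest.length + 1 ≤ n + 1 := by simpa using hlen
          omega
        have hIH := ih r hlen' hr_pw
        have hmapcongr : (PySem.Set.ofList (r.map Prod.fst)).map
              (fun k' => (k', pvSum ((k, v) :: rest) k'))
            = (PySem.Set.ofList (r.map Prod.fst)).map (fun k' => (k', pvSum r k')) :=
          List.map_congr_left (fun k' hk' => by rw [hsum_r k' hk'])
        rw [pvGroupRuns]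
        simp only [← hg, ← hr]
        rw [hIH, pvCanon, pvCanon, hofl, List.map_cons, hmapcongr, hsum_k, List.filter_cons]
        by_cases htot : v + (g.map Prod.snd).sum = 0
        · simp [htot]
        · simp [htot]

-- ===== VERDICT (by name: the statement is the Claim_ definition above) =====
theorem prune_contributions_spec : Claim_equal_prune_contributions := by
  intro l _
  show prune_contributions l = prune_contributions_alt l
  set s := PySem.List.sorted l (fun a : Int × Int => a.1) false with hs
  have hperm : s.Perm l := PySem.List.sorted_perm l _ _
  have hpw : s.Pairwise (fun a b => a.1 ≤ b.1) := PySem.List.sorted_pairwise l _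
  have hsum : ∀ k, pvSum s k = pvSum l k := fun k =>
    List.Perm.sum_eq ((hperm.filter _).map Prod.snd)
  -- B's result = canonical list over s's keys
  have hB : prune_contributions_alt l = pvCanon (s.map Prod.fst) (pvSum l) := by
    rw [prune_contributions_alt, ← hs,
        pv_groupRuns_spec s.length s (le_refl _) hpw, pvCanon, pvCanon]
    exact congrArg _ (List.map_congr_left (fun k _ => by rw [hsum]))
  -- canonical list over s's keys is strictly sorted by key
  have hKs_pw : (PySem.Set.ofList (s.map Prod.fst)).Pairwise (· < ·) := by
    have h1 : (s.map Prod.fst).Pairwise (· ≤ ·) := List.pairwise_map.mpr hpw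
    have h2 : (PySem.Set.ofList (s.map Prod.fst)).Pairwise (· ≤ ·) :=
      List.Pairwise.sublist (pv_ofList_sublist _) h1
    have h3 := h2.and (PySem.Set.nodup_ofList (s.map Prod.fst))
    exact h3.imp (fun h => lt_of_le_of_ne h.1 h.2)
  have hB_pw : (prune_contributions_alt l).Pairwise (fun a b => a.1 < b.1) := by
    rw [hB, pvCanon]
    refine List.Pairwise.sublist List.filter_sublist ?_
    rw [List.pairwise_map]
    exact hKs_pw
  -- permutation with the canonical list over l's keys
  have hKperm : (PySem.Set.ofList (s.map Prod.fst)).Perm (PySem.Set.ofList (l.map Prod.fst)) := by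
    rw [List.perm_ext_iff_of_nodup (PySem.Set.nodup_ofList _) (PySem.Set.nodup_ofList _)]
    intro a
    rw [PySem.Set.mem_ofList, PySem.Set.mem_ofList]
    exact (hperm.map Prod.fst).mem_iff
  have hCperm : (prune_contributions_alt l).Perm (pvCanon (l.map Prod.fst) (pvSum l)) := by
    rw [hB, pvCanon, pvCanon]
    exact (hKperm.map _).filter _
  rw [pv_A_eq_sorted_canon l]
  exact PySem.List.sorted_eq_of_perm_of_pairwise_lt _ _ (fun x : Int × Int => x.1) hCperm hB_pw
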